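-- pv_equiv track=rewrite | github.com/sskong777/Algorithm_Study | Baekjoon/초급편/만취한상범_노유민.py | room
-- ===== SOURCE A (Python) =====
-- def room(n):
--     room_list = [0]
--     for i in range(n):
--         room_list.append(0)
--
--     if n == 1:
--         return 0
--
--     j = 2
--     while(j <= n):
--         for i in range(j, n+1):
--             if i % j == 0:
--                 if room_list[i] == 1:
--                     room_list[i] = 0
--                 else:
--                     room_list[i] = 1
--             else:
--                 continue
--
--         j += 1
--     return room_list.count(0)-1
-- ===== SOURCE B (Python) =====
-- def room(n):
--     # Rooms ending closed are exactly the perfect squares in [1, n], so the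
--     # answer is floor(sqrt(n)) for n >= 2 and 0 for n <= 1 (as A returns).
--     if n <= 1:
--         return 0
--     lo, hi = 1, n
--     while lo < hi:
--         mid = (lo + hi + 1) // 2
--         if mid * mid <= n:
--             lo = mid
--         else:
--             hi = mid - 1
--     return lo
-- ===== Notes on version B (the rewrite author's own statement) =====
-- stated objective: faster
-- what changed: Replaced the O(n^2) divisor-toggle sieve and final zero-count by a binary search for the integer square root, using the fact that exactly the perfect-square rooms end closed.
import Mathlib
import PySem

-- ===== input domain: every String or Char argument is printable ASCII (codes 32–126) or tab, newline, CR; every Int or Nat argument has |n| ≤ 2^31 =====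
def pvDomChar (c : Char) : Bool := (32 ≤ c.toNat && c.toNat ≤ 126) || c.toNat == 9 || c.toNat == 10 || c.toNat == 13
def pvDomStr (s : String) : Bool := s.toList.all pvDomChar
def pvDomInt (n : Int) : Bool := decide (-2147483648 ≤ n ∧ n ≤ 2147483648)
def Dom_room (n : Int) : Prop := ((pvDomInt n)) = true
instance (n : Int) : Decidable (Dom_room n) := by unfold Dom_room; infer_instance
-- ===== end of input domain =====

-- B replaces A's O(n^2) divisor-toggle sieve by a binary search for the integer square root
-- (exactly the perfect-square rooms end closed); same return value on every int input.

-- ===== PORT A =====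
-- body of A's inner `for i in range(j, n+1)` loop (indices are always in range: i ≤ n < len(room_list))
def pvTogBody (j : Int) (l : List Int) (i : Int) : List Int :=
  if PySem.Int.mod i j = 0 then
    if PySem.List.pyGetD l i 0 = 1 then PySem.List.pySetD l i 0 else PySem.List.pySetD l i 1
  else l

-- A's `while j <= n` loop
def pvWhile (n j : Int) (lst : List Int) : List Int :=
  if j ≤ n then pvWhile n (j+1) ((PySem.List.pyRange j (n+1) 1).foldl (pvTogBody j) lst) else lst
termination_by (n + 1 - j).toNat
decreasing_by omega

def room (n : Int) : Int :=
  let room_list := (PySem.List.pyRange 0 n 1).foldl (fun l _ => l ++ [(0:Int)]) [0]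
  if n = 1 then 0
  else (PySem.List.count (pvWhile n 2 room_list) 0 : Int) - 1

-- ===== PORT B =====
-- binary search for the largest mid in [lo, hi] with mid*mid ≤ n
def pvBS (n lo hi : Int) : Int :=
  if lo < hi then
    let mid := PySem.Int.floordiv (lo + hi + 1) 2
    if mid * mid ≤ n then pvBS n mid hi else pvBS n lo (mid - 1)
  else lo
termination_by (hi - lo).toNat
decreasing_by
  all_goals
    have h := PySem.Int.floordiv_two_mid_bounds (lo := lo + 1) (hi := hi) (by omega)
    have e : lo + 1 + hi = lo + hi + 1 := by ring
    rw [e] at h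
    simp only [mid] at *
    omega

def room_alt (n : Int) : Int := if n ≤ 1 then 0 else pvBS n 1 n

-- ===== PRECONDITION & SPEC =====
def Spec_room (n : Int) (out : Int) : Prop := out = room_alt n
instance (n : Int) (out : Int) : Decidable (Spec_room n out) := by unfold Spec_room; infer_instance

-- ===== CLAIM (what is proved, stated in full; the proofs are below) =====
def Claim_equal_room : Prop := ∀ (n : Int), Dom_room n → Spec_room n (room n)

-- ===== LEMMAS AND PROOFS =====

def pvTog (v : Int) : Int := if v = 1 then 0 else 1

lemma pvTogBody_length (j : Int) (l : List Int) (i : Int) :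
    (pvTogBody j l i).length = l.length := by
  unfold pvTogBody
  split_ifs <;> simp [PySem.List.length_pySetD]

lemma foldl_togBody_length (j : Int) (xs : List Int) : ∀ (lst : List Int),
    (xs.foldl (pvTogBody j) lst).length = lst.length := by
  induction xs with
  | nil => intro lst; rfl
  | cons x xs ih => intro lst; rw [List.foldl_cons, ih, pvTogBody_length]

lemma togBody_getD (j : Int) (a : Int) (ha : 0 ≤ a) (lst : List Int)
    (hlen : a < (lst.length : Int)) (k : Nat) (hk : k < lst.length) :
    (pvTogBody j lst a).getD k 0 =
      if (k : Int) = a ∧ j ∣ a then pvTog (lst.getD k 0) else lst.getD k 0 := by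
  have hdvd : PySem.Int.mod a j = 0 ↔ j ∣ a := PySem.Int.mod_eq_zero_iff_dvd a j
  have hget : PySem.List.pyGetD lst a 0 = lst[a.toNat]'(by omega) :=
    PySem.List.pyGetD_eq_getElem lst (0:Int) ha (by simpa using hlen)
  have hset0 : PySem.List.pySetD lst a 0 = lst.set a.toNat 0 := PySem.List.pySetD_of_nonneg lst (0:Int) ha
  have hset1 : PySem.List.pySetD lst a 1 = lst.set a.toNat 1 := PySem.List.pySetD_of_nonneg lst (1:Int) ha
  have key : ∀ v : Int, (lst.set a.toNat v).getD k 0 = if k = a.toNat then v else lst.getD k 0 := by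
    intro v
    by_cases h : k = a.toNat
    · subst h
      simp [List.getD_eq_getElem?_getD, hk]
    · simp [List.getD_eq_getElem?_getD, Ne.symm h, h]
  unfold pvTogBody pvTog
  by_cases hd : j ∣ a
  · rw [if_pos (hdvd.mpr hd), hget, hset0, hset1]
    by_cases hka : k = a.toNat
    · subst hka
      have hia : ((a.toNat : Nat) : Int) = a := by omega
      have hga : lst[a.toNat]'(by omega) = lst.getD a.toNat 0 := (List.getD_eq_getElem lst 0 (by omega)).symm
      rw [if_pos (show ((a.toNat:Nat):Int) = a ∧ j ∣ a from ⟨hia, hd⟩)]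
      by_cases h1 : lst.getD a.toNat 0 = 1
      · rw [hga, if_pos h1, key, if_pos rfl, if_pos h1]
      · rw [hga, if_neg h1, key, if_pos rfl, if_neg h1]
    · have hia : ¬(((k:Nat):Int) = a ∧ j ∣ a) := by rintro ⟨h1, _⟩; exact hka (by omega)
      rw [if_neg hia]
      by_cases h1 : lst[a.toNat]'(by omega) = 1
      · rw [if_pos h1, key, if_neg hka]
      · rw [if_neg h1, key, if_neg hka]
  · rw [if_neg (fun h => hd (hdvd.mp h)), if_neg (by rintro ⟨_, h2⟩; exact hd h2)]

lemma foldl_tog_getD (j : Int) (hj : 1 ≤ j) (fuel : Nat) : ∀ (a b : Int) (lst : List Int) (k : Nat),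
    (b - a).toNat ≤ fuel → 0 ≤ a → b ≤ (lst.length : Int) → k < lst.length →
    ((PySem.List.pyRange a b 1).foldl (pvTogBody j) lst).getD k 0 =
      if a ≤ (k:Int) ∧ (k:Int) < b ∧ j ∣ (k:Int) then pvTog (lst.getD k 0) else lst.getD k 0 := by
  induction fuel with
  | zero =>
    intro a b lst k hf ha hb hk
    rw [PySem.List.pyRange_one_eq_nil (by omega), List.foldl_nil,
        if_neg (by rintro ⟨h1, h2, _⟩; omega)]
  | succ m ih =>
    intro a b lst k hf ha hb hk
    by_cases hab : a < b
    · rw [PySem.List.pyRange_one_cons hab, List.foldl_cons]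
      rw [ih (a+1) b (pvTogBody j lst a) k (by omega) (by omega)
            (by rw [pvTogBody_length]; exact hb) (by rw [pvTogBody_length]; exact hk)]
      rw [togBody_getD j a ha lst (by omega) k hk]
      by_cases hka : (k:Int) = a
      · rw [if_neg (by omega : ¬(a + 1 ≤ (k:Int) ∧ (k:Int) < b ∧ j ∣ (k:Int)))]
        by_cases hd : j ∣ a
        · rw [if_pos ⟨hka, hd⟩, if_pos ⟨by omega, by omega, hka ▸ hd⟩]
        · rw [if_neg (by rintro ⟨_, h2⟩; exact hd h2),
              if_neg (by rintro ⟨_, _, h3⟩; exact hd (hka ▸ h3))]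
      · rw [if_neg (show ¬((k:Int) = a ∧ j ∣ a) by rintro ⟨h1, _⟩; exact hka h1)]
        by_cases hcond : a + 1 ≤ (k:Int) ∧ (k:Int) < b ∧ j ∣ (k:Int)
        · rw [if_pos hcond, if_pos ⟨by omega, hcond.2⟩]
        · rw [if_neg hcond, if_neg (by rintro ⟨h1, h2, h3⟩; exact hcond ⟨by omega, h2, h3⟩)]
    · rw [PySem.List.pyRange_one_eq_nil (by omega), List.foldl_nil,
          if_neg (by rintro ⟨h1, h2, _⟩; omega)]

lemma filter_Icc_step (j n : Int) (hj : j ≤ n) (P : Int → Prop) [DecidablePred P] :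
    ((Finset.Icc j n).filter P).card =
      ((Finset.Icc (j+1) n).filter P).card + (if P j then 1 else 0) := by
  have hins : Finset.Icc j n = insert j (Finset.Icc (j+1) n) := by
    ext x; simp only [Finset.mem_Icc, Finset.mem_insert]; omega
  rw [hins, Finset.filter_insert]
  split_ifs with h
  · rw [Finset.card_insert_of_notMem (by simp only [Finset.mem_filter, Finset.mem_Icc]; omega)]
  · omega

lemma pvWhile_length (n : Int) (fuel : Nat) : ∀ (j : Int) (lst : List Int),
    (n + 1 - j).toNat ≤ fuel → (pvWhile n j lst).length = lst.length := by
  induction fuel with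
  | zero =>
    intro j lst hf
    rw [pvWhile, if_neg (by omega)]
  | succ m ih =>
    intro j lst hf
    by_cases hj : j ≤ n
    · rw [pvWhile, if_pos hj, ih (j+1) _ (by omega), foldl_togBody_length]
    · rw [pvWhile, if_neg hj]

lemma pvWhile_getD (n : Int) (fuel : Nat) : ∀ (j : Int) (lst : List Int) (k : Nat),
    (n + 1 - j).toNat ≤ fuel → 2 ≤ j → (n : Int) < lst.length → (k : Int) ≤ n →
    (pvWhile n j lst).getD k 0 =
      pvTog^[((Finset.Icc j n).filter (fun d => (k:Int) % d = 0 ∧ d ≤ (k:Int))).card] (lst.getD k 0) := by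
  induction fuel with
  | zero =>
    intro j lst k hf hj hlen hk
    rw [pvWhile, if_neg (by omega), Finset.Icc_eq_empty (by omega), Finset.filter_empty,
        Finset.card_empty, Function.iterate_zero_apply]
  | succ m ih =>
    intro j lst k hf hj hlen hk
    by_cases hjn : j ≤ n
    · rw [pvWhile, if_pos hjn]
      have hlen' : (n : Int) < (((PySem.List.pyRange j (n+1) 1).foldl (pvTogBody j) lst).length : Int) := by
        rw [foldl_togBody_length]; exact hlen
      rw [ih (j+1) _ k (by omega) (by omega) hlen' hk]
      have hkl : k < lst.length := by omega
      rw [foldl_tog_getD j (by omega) ((n+1-j).toNat) j (n+1) lst k (by omega) (by omega) (by omega) hkl]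
      rw [filter_Icc_step j n hjn]
      rw [Function.iterate_add_apply]
      congr 1
      by_cases hP : (k:Int) % j = 0 ∧ j ≤ (k:Int)
      · rw [if_pos hP, if_pos ⟨hP.2, by omega, Int.dvd_of_emod_eq_zero hP.1⟩, Function.iterate_one]
      · rw [if_neg hP, if_neg (by rintro ⟨h1, _, h3⟩; exact hP ⟨Int.emod_eq_zero_of_dvd h3, h1⟩), Function.iterate_zero_apply]
    · rw [pvWhile, if_neg hjn, Finset.Icc_eq_empty (by omega), Finset.filter_empty,
          Finset.card_empty, Function.iterate_zero_apply]

lemma pvTog_iter_zero (c : Nat) : pvTog^[c] 0 = if Even c then 0 else 1 := by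
  induction c with
  | zero => simp
  | succ m ih =>
    rw [Function.iterate_succ_apply', ih]
    by_cases h : Even m
    · rw [if_pos h, if_neg (by simp [Nat.even_add_one, h])]
      simp [pvTog]
    · rw [if_neg h, if_pos (by simp [Nat.even_add_one, h])]
      simp [pvTog]

lemma init_list (n : Int) :
    (PySem.List.pyRange 0 n 1).foldl (fun l _ => l ++ [(0:Int)]) [0] =
      List.replicate (n.toNat + 1) 0 := by
  have h := PySem.List.foldl_append_singleton_eq_map (fun _ : Int => (0:Int))
      (PySem.List.pyRange 0 n 1) [0]
  rw [h, List.map_const', PySem.List.length_pyRange_one]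
  simp [List.replicate_succ]


lemma pvDcard_zero (n : Int) :
    ((Finset.Icc 2 n).filter (fun d => (((0:Nat)):Int) % d = 0 ∧ d ≤ (((0:Nat)):Int))).card = 0 := by
  rw [Finset.card_eq_zero, Finset.filter_eq_empty_iff]
  intro d hd
  rw [Finset.mem_Icc] at hd
  rintro ⟨_, h2⟩
  omega

lemma pvDcard_eq (n : Int) (k : Nat) (hkn : (k:Int) ≤ n) :
    ((Finset.Icc 2 n).filter (fun d => (k:Int) % d = 0 ∧ d ≤ (k:Int))).card =
      ((Finset.Icc 2 (k:Int)).filter (fun d => d ∣ (k:Int))).card := by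
  have hset : ((Finset.Icc 2 n).filter (fun d => (k:Int) % d = 0 ∧ d ≤ (k:Int))) =
      ((Finset.Icc 2 (k:Int)).filter (fun d => d ∣ (k:Int))) := by
    ext d
    simp only [Finset.mem_filter, Finset.mem_Icc]
    constructor
    · rintro ⟨⟨h1, h2⟩, h3, h4⟩
      exact ⟨⟨h1, h4⟩, Int.dvd_of_emod_eq_zero h3⟩
    · rintro ⟨⟨h1, h2⟩, h3⟩
      exact ⟨⟨h1, by omega⟩, Int.emod_eq_zero_of_dvd h3, h2⟩
  rw [hset]

lemma divisors_card (K : Int) (hK : 1 ≤ K) :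
    ((Finset.Icc 1 K).filter (fun d => d ∣ K)).card =
      ((Finset.Icc 2 K).filter (fun d => d ∣ K)).card + 1 := by
  have hins : (Finset.Icc 1 K).filter (fun d => d ∣ K) =
      insert 1 ((Finset.Icc 2 K).filter (fun d => d ∣ K)) := by
    ext d
    simp only [Finset.mem_filter, Finset.mem_Icc, Finset.mem_insert]
    constructor
    · rintro ⟨⟨h1, h2⟩, h3⟩
      by_cases hd : d = 1
      · exact Or.inl hd
      · exact Or.inr ⟨⟨by omega, h2⟩, h3⟩
    · rintro (h | ⟨⟨h1, h2⟩, h3⟩)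
      · exact ⟨⟨by omega, by omega⟩, h ▸ one_dvd K⟩
      · exact ⟨⟨by omega, h2⟩, h3⟩
  rw [hins, Finset.card_insert_of_notMem (by simp only [Finset.mem_filter, Finset.mem_Icc]; omega)]

lemma pair_card (K : Int) (hK : 1 ≤ K) :
    (((Finset.Icc 1 K).filter (fun d => d ∣ K)).filter (fun d => d*d < K)).card =
      (((Finset.Icc 1 K).filter (fun d => d ∣ K)).filter (fun d => K < d*d)).card := by
  apply Finset.card_bij' (i := fun d _ => K / d) (j := fun e _ => K / e)
  · intro d hd
    simp only [Finset.mem_filter, Finset.mem_Icc] at hd ⊢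
    obtain ⟨⟨⟨h1, h2⟩, hdvd⟩, hsm⟩ := hd
    have hde : K / d * d = K := Int.ediv_mul_cancel hdvd
    set e := K / d with he
    have he1 : 1 ≤ e := by nlinarith
    have hdlt : d < e := by nlinarith
    have hedvd : e ∣ K := ⟨d, hde.symm⟩
    refine ⟨⟨⟨he1, Int.le_of_dvd (by omega) hedvd⟩, hedvd⟩, by nlinarith⟩
  · intro e he
    simp only [Finset.mem_filter, Finset.mem_Icc] at he ⊢
    obtain ⟨⟨⟨h1, h2⟩, hdvd⟩, hlg⟩ := he
    have hde : K / e * e = K := Int.ediv_mul_cancel hdvd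
    set d := K / e with hd
    have hd1 : 1 ≤ d := by nlinarith
    have hdlt : d < e := by nlinarith
    have hddvd : d ∣ K := ⟨e, hde.symm⟩
    refine ⟨⟨⟨hd1, Int.le_of_dvd (by omega) hddvd⟩, hddvd⟩, by nlinarith⟩
  · intro d hd
    simp only [Finset.mem_filter, Finset.mem_Icc] at hd
    obtain ⟨⟨⟨h1, h2⟩, hdvd⟩, hsm⟩ := hd
    have hde : K / d * d = K := Int.ediv_mul_cancel hdvd
    have hedvd : (K / d) ∣ K := ⟨d, hde.symm⟩
    have hee : K / (K / d) * (K / d) = K := Int.ediv_mul_cancel hedvd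
    have hdpos : (0:Int) < K / d := by nlinarith
    exact mul_right_cancel₀ (ne_of_gt hdpos) (by rw [hee]; nlinarith)
  · intro e he
    simp only [Finset.mem_filter, Finset.mem_Icc] at he
    obtain ⟨⟨⟨h1, h2⟩, hdvd⟩, hlg⟩ := he
    have hde : K / e * e = K := Int.ediv_mul_cancel hdvd
    have hddvd : (K / e) ∣ K := ⟨e, hde.symm⟩
    have hee : K / (K / e) * (K / e) = K := Int.ediv_mul_cancel hddvd
    have hdpos : (0:Int) < K / e := by nlinarith
    exact mul_right_cancel₀ (ne_of_gt hdpos) (by rw [hee]; nlinarith)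

lemma parity_iff (n : Int) (k : Nat) (hk1 : 1 ≤ k) (hkn : (k:Int) ≤ n) :
    Even (((Finset.Icc 2 n).filter (fun d => (k:Int) % d = 0 ∧ d ≤ (k:Int))).card) ↔
      Nat.sqrt k * Nat.sqrt k = k := by
  have hK : (1:Int) ≤ (k:Int) := by exact_mod_cast hk1
  rw [pvDcard_eq n k hkn]
  set S := (Finset.Icc 1 (k:Int)).filter (fun d => d ∣ (k:Int)) with hS
  have hdc := divisors_card (k:Int) hK
  rw [← hS] at hdc
  have hsplit1 : (S.filter (fun d => d*d < (k:Int))).card +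
      (S.filter (fun d => ¬ d*d < (k:Int))).card = S.card :=
    Finset.card_filter_add_card_filter_not _
  have hsplit2 : ((S.filter (fun d => ¬ d*d < (k:Int))).filter (fun d => (k:Int) < d*d)).card +
      ((S.filter (fun d => ¬ d*d < (k:Int))).filter (fun d => ¬ (k:Int) < d*d)).card =
      (S.filter (fun d => ¬ d*d < (k:Int))).card :=
    Finset.card_filter_add_card_filter_not _
  have hB : (S.filter (fun d => ¬ d*d < (k:Int))).filter (fun d => (k:Int) < d*d) =
      S.filter (fun d => (k:Int) < d*d) := by
    rw [Finset.filter_filter]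
    apply Finset.filter_congr
    intro d _
    constructor
    · rintro ⟨_, h⟩; exact h
    · intro h; exact ⟨not_lt.mpr (le_of_lt h), h⟩
  have hC : (S.filter (fun d => ¬ d*d < (k:Int))).filter (fun d => ¬ (k:Int) < d*d) =
      S.filter (fun d => d*d = (k:Int)) := by
    rw [Finset.filter_filter]
    apply Finset.filter_congr
    intro d _
    constructor
    · rintro ⟨h1, h2⟩; exact le_antisymm (not_lt.mp h2) (not_lt.mp h1)
    · intro h; exact ⟨not_lt.mpr h.ge, not_lt.mpr h.le⟩
  have hAB := pair_card (k:Int) hK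
  rw [← hS] at hAB
  have hCle : (S.filter (fun d => d*d = (k:Int))).card ≤ 1 := by
    apply Finset.card_le_one.mpr
    intro a ha b hb
    simp only [Finset.mem_filter, Finset.mem_Icc, hS] at ha hb
    nlinarith [ha.1.1.1, hb.1.1.1, ha.2, hb.2]
  have hCiff : (S.filter (fun d => d*d = (k:Int))).card = 1 ↔
      Nat.sqrt k * Nat.sqrt k = k := by
    constructor
    · intro h
      have hne : (S.filter (fun d => d*d = (k:Int))).Nonempty :=
        Finset.card_pos.mp (by omega)
      obtain ⟨d, hd⟩ := hne
      simp only [Finset.mem_filter, Finset.mem_Icc, hS] at hd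
      obtain ⟨⟨⟨hd1, _⟩, _⟩, hdd⟩ := hd
      have hm : d.toNat * d.toNat = k := by
        have : ((d.toNat * d.toNat : Nat) : Int) = (k : Int) := by
          push_cast
          rw [Int.toNat_of_nonneg (by omega)]
          exact hdd
        exact_mod_cast this
      have : Nat.sqrt k = d.toNat := by
        rw [← hm, ← Nat.pow_two d.toNat, Nat.sqrt_eq']
      rw [this, hm]
    · intro h
      rw [Finset.card_eq_one]
      refine ⟨((Nat.sqrt k : Nat) : Int), ?_⟩
      apply Finset.eq_singleton_iff_unique_mem.mpr
      constructor
      · simp only [Finset.mem_filter, Finset.mem_Icc, hS]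
        have h1 : 1 ≤ Nat.sqrt k := Nat.le_sqrt'.mpr (by simpa using hk1)
        have hdd : ((Nat.sqrt k : Nat) : Int) * ((Nat.sqrt k : Nat) : Int) = (k:Int) := by
          exact_mod_cast h
        refine ⟨⟨⟨by exact_mod_cast h1, ?_⟩, ⟨((Nat.sqrt k : Nat) : Int), hdd.symm⟩⟩, hdd⟩
        calc ((Nat.sqrt k : Nat) : Int) ≤ ((k:Nat) : Int) := by exact_mod_cast Nat.sqrt_le_self k
          _ = (k:Int) := rfl
      · intro e he
        simp only [Finset.mem_filter, Finset.mem_Icc, hS] at he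
        have hdd : ((Nat.sqrt k : Nat) : Int) * ((Nat.sqrt k : Nat) : Int) = (k:Int) := by
          exact_mod_cast h
        nlinarith [he.1.1.1, he.2]
  rw [hB, hC] at hsplit2
  rw [← hCiff, Nat.even_iff]
  omega

lemma card_squares (N : Nat) :
    ((Finset.Icc 1 N).filter (fun k => Nat.sqrt k * Nat.sqrt k = k)).card = Nat.sqrt N := by
  rw [show Nat.sqrt N = (Finset.Icc 1 (Nat.sqrt N)).card by rw [Nat.card_Icc]; omega]
  apply Finset.card_bij' (i := fun k _ => Nat.sqrt k) (j := fun m _ => m * m)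
  · intro k hk
    simp only [Finset.mem_filter, Finset.mem_Icc] at hk ⊢
    obtain ⟨⟨h1, h2⟩, h3⟩ := hk
    exact ⟨Nat.le_sqrt'.mpr (by simpa using h1), Nat.sqrt_le_sqrt h2⟩
  · intro m hm
    simp only [Finset.mem_filter, Finset.mem_Icc] at hm ⊢
    obtain ⟨h1, h2⟩ := hm
    refine ⟨⟨by nlinarith, ?_⟩, by rw [show m * m = m ^ 2 from (Nat.pow_two m).symm, Nat.sqrt_eq', Nat.pow_two]⟩
    have := Nat.le_sqrt'.mp h2
    rwa [Nat.pow_two] at this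
  · intro k hk
    simp only [Finset.mem_filter, Finset.mem_Icc] at hk
    exact hk.2
  · intro m hm
    rw [show m * m = m ^ 2 from (Nat.pow_two m).symm, Nat.sqrt_eq']

lemma final_list (n : Int) (hn : 2 ≤ n) :
    pvWhile n 2 (List.replicate (n.toNat + 1) 0) =
      (List.range (n.toNat + 1)).map (fun (k : Nat) =>
        if Even (((Finset.Icc 2 n).filter (fun d => ((k:Int)) % d = 0 ∧ d ≤ ((k:Int)))).card)
        then (0:Int) else 1) := by
  have hlen : (pvWhile n 2 (List.replicate (n.toNat + 1) 0)).length = n.toNat + 1 := by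
    rw [pvWhile_length n ((n-1).toNat) 2 _ (by omega), List.length_replicate]
  apply List.ext_getElem
  · rw [hlen, List.length_map, List.length_range]
  · intro i h1 h2
    rw [List.getElem_map, List.getElem_range]
    have hi : i < n.toNat + 1 := by omega
    have hgd := pvWhile_getD n ((n-1).toNat) 2 (List.replicate (n.toNat + 1) 0) i
      (by omega) (by omega) (by rw [List.length_replicate]; omega) (by omega)
    rw [← List.getD_eq_getElem _ 0 h1, hgd]
    simp only [List.getD_eq_getElem?_getD, List.getElem?_getD_replicate_default_eq]
    exact pvTog_iter_zero _


lemma countP_range_decide (m : Nat) (P : Nat → Prop) [DecidablePred P] :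
    (List.range m).countP (fun k => decide (P k)) = ((Finset.range m).filter P).card := by
  simp [Finset.range, Finset.card, Finset.filter, Multiset.range, Multiset.filter,
    List.countP_eq_length_filter]

lemma count_evens (n : Int) (hn : 2 ≤ n) :
    ((Finset.range (n.toNat + 1)).filter
      (fun (k : Nat) => Even (((Finset.Icc 2 n).filter
        (fun d => ((k:Int)) % d = 0 ∧ d ≤ ((k:Int)))).card))).card = Nat.sqrt n.toNat + 1 := by
  have hins : Finset.range (n.toNat + 1) = insert 0 (Finset.Icc 1 n.toNat) := by
    ext x; simp only [Finset.mem_range, Finset.mem_insert, Finset.mem_Icc]; omega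
  rw [hins, Finset.filter_insert, if_pos (by rw [pvDcard_zero n]; exact Even.zero),
      Finset.card_insert_of_notMem (by simp only [Finset.mem_filter, Finset.mem_Icc]; omega)]
  have hset : ((Finset.Icc 1 n.toNat).filter
      (fun (k : Nat) => Even (((Finset.Icc 2 n).filter
        (fun d => ((k:Int)) % d = 0 ∧ d ≤ ((k:Int)))).card))) =
      ((Finset.Icc 1 n.toNat).filter (fun k => Nat.sqrt k * Nat.sqrt k = k)) := by
    apply Finset.filter_congr
    intro k hk
    rw [Finset.mem_Icc] at hk
    exact parity_iff n k hk.1 (by omega)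
  rw [hset, card_squares]

lemma final_count (n : Int) (hn : 2 ≤ n) :
    PySem.List.count (pvWhile n 2 (List.replicate (n.toNat + 1) 0)) 0 =
      Nat.sqrt n.toNat + 1 := by
  rw [PySem.List.count_eq, final_list n hn, List.count_eq_countP, List.countP_map]
  have hfun : ((fun (x : Int) => x == (0:Int)) ∘ (fun (k : Nat) =>
      if Even (((Finset.Icc 2 n).filter (fun d => ((k:Int)) % d = 0 ∧ d ≤ ((k:Int)))).card)
      then (0:Int) else 1)) = (fun (k : Nat) =>
      decide (Even (((Finset.Icc 2 n).filter
        (fun d => ((k:Int)) % d = 0 ∧ d ≤ ((k:Int)))).card))) := by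
    funext k
    by_cases h : Even (((Finset.Icc 2 n).filter
        (fun d => ((k:Int)) % d = 0 ∧ d ≤ ((k:Int)))).card)
    · rw [Function.comp_apply, if_pos h, decide_eq_true h]
      decide
    · rw [Function.comp_apply, if_neg h, decide_eq_false h]
      decide
  rw [hfun, countP_range_decide, count_evens n hn]

theorem pvBS_spec (n : Int) (fuel : Nat) : ∀ (lo hi : Int), (hi - lo).toNat ≤ fuel → 1 ≤ lo → lo ≤ hi →
    lo * lo ≤ n → n < (hi+1)*(hi+1) →
    pvBS n lo hi * pvBS n lo hi ≤ n ∧ n < (pvBS n lo hi + 1) * (pvBS n lo hi + 1) ∧ 1 ≤ pvBS n lo hi := by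
  induction fuel with
  | zero =>
    intro lo hi hf h1 h2 h3 h4
    have : lo = hi := by omega
    subst this
    rw [pvBS, if_neg (by omega)]
    exact ⟨h3, h4, h1⟩
  | succ m ih =>
    intro lo hi hf h1 h2 h3 h4
    by_cases hlt : lo < hi
    · have hmid := PySem.Int.floordiv_two_mid_bounds (lo := lo + 1) (hi := hi) (by omega)
      have e : lo + 1 + hi = lo + hi + 1 := by ring
      rw [e] at hmid
      rw [pvBS, if_pos hlt]
      simp only []
      by_cases hle : PySem.Int.floordiv (lo + hi + 1) 2 * PySem.Int.floordiv (lo + hi + 1) 2 ≤ n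
      · rw [if_pos hle]
        exact ih _ _ (by omega) (by omega) (by omega) hle h4
      · rw [if_neg hle]
        refine ih _ _ (by omega) h1 (by omega) h3 ?_
        have : PySem.Int.floordiv (lo + hi + 1) 2 - 1 + 1 = PySem.Int.floordiv (lo + hi + 1) 2 := by ring
        rw [this]; omega
    · have : lo = hi := by omega
      subst this
      rw [pvBS, if_neg (by omega)]
      exact ⟨h3, h4, h1⟩

theorem room_alt_eq (n : Int) (hn : 2 ≤ n) : room_alt n = (Nat.sqrt n.toNat : Int) := by
  unfold room_alt
  rw [if_neg (by omega)]
  have h := pvBS_spec n ((n - 1).toNat) 1 n (by omega) (by omega) (by omega)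
    (by nlinarith) (by nlinarith)
  obtain ⟨h1, h2, h3⟩ := h
  have hs1 : ((Nat.sqrt n.toNat : Nat) : Int) * ((Nat.sqrt n.toNat : Nat) : Int) ≤ n := by
    have := Nat.sqrt_le' n.toNat
    rw [Nat.pow_two] at this
    have hcast : ((Nat.sqrt n.toNat * Nat.sqrt n.toNat : Nat) : Int) ≤ ((n.toNat : Nat) : Int) := by
      exact_mod_cast this
    push_cast at hcast
    rwa [Int.toNat_of_nonneg (by omega)] at hcast
  have hs2 : n < (((Nat.sqrt n.toNat : Nat) : Int) + 1) * (((Nat.sqrt n.toNat : Nat) : Int) + 1) := by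
    have := Nat.lt_succ_sqrt' n.toNat
    rw [Nat.pow_two] at this
    have hcast : ((n.toNat : Nat) : Int) < ((Nat.sqrt n.toNat + 1) * (Nat.sqrt n.toNat + 1) : Nat) := by
      exact_mod_cast Nat.lt_of_lt_of_le this (by rfl)
    push_cast at hcast
    rwa [Int.toNat_of_nonneg (by omega)] at hcast
  set r := pvBS n 1 n
  set s := ((Nat.sqrt n.toNat : Nat) : Int)
  have hsnn : 0 ≤ s := by positivity
  apply le_antisymm
  · nlinarith [sq_nonneg (r - s - 1), sq_nonneg (r + s + 1)]
  · nlinarith [sq_nonneg (s - r - 1), sq_nonneg (s + r + 1)]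

theorem room_eq (n : Int) (hn : 2 ≤ n) : room n = (Nat.sqrt n.toNat : Int) := by
  show (if n = 1 then 0
    else (PySem.List.count (pvWhile n 2
      ((PySem.List.pyRange 0 n 1).foldl (fun l _ => l ++ [(0:Int)]) [0])) 0 : Int) - 1) = _
  rw [if_neg (by omega), init_list n, final_count n hn]
  push_cast
  ring

theorem room_small (n : Int) (hn : n ≤ 1) : room n = 0 := by
  by_cases h1 : n = 1
  · show (if n = 1 then 0 else _) = 0
    rw [if_pos h1]
  · show (if n = 1 then 0
      else (PySem.List.count (pvWhile n 2
        ((PySem.List.pyRange 0 n 1).foldl (fun l _ => l ++ [(0:Int)]) [0])) 0 : Int) - 1) = 0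
    rw [if_neg h1, PySem.List.pyRange_one_eq_nil (by omega), List.foldl_nil,
        pvWhile, if_neg (by omega)]
    rw [PySem.List.count_eq]
    simp

-- ===== VERDICT (by name: the statement is the Claim_ definition above) =====
theorem room_spec : Claim_equal_room := by
  intro n _
  unfold Spec_room
  by_cases hn : n ≤ 1
  · rw [room_small n hn]
    unfold room_alt
    rw [if_pos hn]
  · rw [room_eq n (by omega), room_alt_eq n (by omega)]
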